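-- pv_equiv track=rewrite | github.com/rmorriscpux/daily-coding-challenges | challenge_195.py | getNumsBetween
-- ===== SOURCE A (Python) =====
-- from typing import List
--
-- def getNumsBetween(A: List[List[int]], i1: int, j1: int, i2: int, j2: int):
--     N = len(A)
--     M = len(A[0])
--     assert all(map(lambda row: len(row) == M, A[1:]))
--     assert i1 >= 0 and i1 < N and j1 >= 0 and j1 < M and i2 >= 0 and i2 < N and j2 >= 0 and j2 < M
--
--     if A[i1][j1] == A[i2][j2]:
--         num_instances = 0
--         for row in A:
--             num_instances += row.count(A[i1][j1])
--         count = N * M - num_instances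
--
--     elif A[i1][j1] > A[i2][j2]:
--         count = N * M
--
--     else:
--         count = 0
--         for row in A[:i1]:
--             count += list(map(lambda num: num < A[i1][j1], row)).count(True)
--         for row in A[i1:]:
--             count += list(map(lambda num: num < A[i1][j1], row[:j1])).count(True)
--         for row in A[i2+1:]:
--             count += list(map(lambda num: num > A[i2][j2], row)).count(True)
--         for row in A[:i2+1]:
--             count += list(map(lambda num: num > A[i2][j2], row[j2+1:])).count(True)
--
--     return count
-- ===== SOURCE B (Python) =====
-- from typing import List
--
-- def getNumsBetween(A: List[List[int]], i1: int, j1: int, i2: int, j2: int):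
--     N = len(A)
--     M = len(A[0])
--     assert all(map(lambda row: len(row) == M, A[1:]))
--     assert i1 >= 0 and i1 < N and j1 >= 0 and j1 < M and i2 >= 0 and i2 < N and j2 >= 0 and j2 < M
--
--     v1 = A[i1][j1]
--     v2 = A[i2][j2]
--     if v1 == v2:
--         return N * M - sum(row.count(v1) for row in A)
--     if v1 > v2:
--         return N * M
--     total = 0
--     for i, row in enumerate(A):
--         for j, val in enumerate(row):
--             if (i < i1 or j < j1) and val < v1:
--                 total += 1
--             if (i > i2 or j > j2) and val > v2:
--                 total += 1
--     return total
-- ===== Notes on version B (the rewrite author's own statement) =====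
-- stated objective: simpler
-- what changed: The v1<v2 branch's four sliced scans (two take/drop row slices plus per-row column slices, each via map/count(True)) are replaced by a single enumerate-indexed pass over all cells testing (i<i1 or j<j1) and val<v1 and (i>i2 or j>j2) and val>v2 directly, and the equal branch's accumulator loop by sum(row.count(v1) for row in A).
import Mathlib
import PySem

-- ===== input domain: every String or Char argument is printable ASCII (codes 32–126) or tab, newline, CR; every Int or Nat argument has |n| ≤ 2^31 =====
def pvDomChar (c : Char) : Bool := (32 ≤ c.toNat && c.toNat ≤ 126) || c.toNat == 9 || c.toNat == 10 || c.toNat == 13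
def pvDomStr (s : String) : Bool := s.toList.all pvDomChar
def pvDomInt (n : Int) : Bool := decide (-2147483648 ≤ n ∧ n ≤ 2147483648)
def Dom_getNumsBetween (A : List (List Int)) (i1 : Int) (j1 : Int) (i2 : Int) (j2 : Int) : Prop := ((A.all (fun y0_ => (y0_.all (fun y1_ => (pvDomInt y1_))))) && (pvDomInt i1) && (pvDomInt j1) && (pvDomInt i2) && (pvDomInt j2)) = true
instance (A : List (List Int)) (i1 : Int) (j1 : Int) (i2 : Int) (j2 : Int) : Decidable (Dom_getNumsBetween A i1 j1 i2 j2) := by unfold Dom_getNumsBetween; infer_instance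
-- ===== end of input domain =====

-- B replaces A's four sliced scans of the v1<v2 branch by one enumerate-indexed pass over all
-- cells (and the equal branch's counting loop by a sum of row counts): same cost, simpler shape.

-- ===== PORT A =====
def getNumsBetween (A : List (List Int)) (i1 : Int) (j1 : Int) (i2 : Int) (j2 : Int) : Int :=
  let N : Int := (A.length : Int)
  let M : Int := ((PySem.List.pyGetD A 0 []).length : Int)
  let v1 : Int := PySem.List.pyGetD (PySem.List.pyGetD A i1 []) j1 0
  let v2 : Int := PySem.List.pyGetD (PySem.List.pyGetD A i2 []) j2 0
  if v1 = v2 then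
    let numInstances : Int :=
      A.foldl (fun acc row => acc + (PySem.List.count row v1 : Int)) 0
    N * M - numInstances
  else if v1 > v2 then
    N * M
  else
    let c : Int := (PySem.List.slice A none (some i1)).foldl
      (fun acc row => acc + ((row.map (fun num => decide (num < v1))).count true : Int)) 0
    let c : Int := (PySem.List.slice A (some i1) none).foldl
      (fun acc row => acc + (((PySem.List.slice row none (some j1)).map (fun num => decide (num < v1))).count true : Int)) c
    let c : Int := (PySem.List.slice A (some (i2+1)) none).foldl
      (fun acc row => acc + ((row.map (fun num => decide (num > v2))).count true : Int)) c
    let c : Int := (PySem.List.slice A none (some (i2+1))).foldl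
      (fun acc row => acc + (((PySem.List.slice row (some (j2+1)) none).map (fun num => decide (num > v2))).count true : Int)) c
    c

-- ===== PORT B =====
def getNumsBetween_alt (A : List (List Int)) (i1 : Int) (j1 : Int) (i2 : Int) (j2 : Int) : Int :=
  let N : Int := (A.length : Int)
  let M : Int := ((PySem.List.pyGetD A 0 []).length : Int)
  let v1 : Int := PySem.List.pyGetD (PySem.List.pyGetD A i1 []) j1 0
  let v2 : Int := PySem.List.pyGetD (PySem.List.pyGetD A i2 []) j2 0
  if v1 = v2 then
    N * M - (A.map (fun row => (PySem.List.count row v1 : Int))).sum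
  else if v1 > v2 then
    N * M
  else
    (PySem.List.enumerate A 0).foldl (fun total p =>
      (PySem.List.enumerate p.2 0).foldl (fun t q =>
        let t := if (p.1 < i1 ∨ q.1 < j1) ∧ q.2 < v1 then t + 1 else t
        if (i2 < p.1 ∨ j2 < q.1) ∧ v2 < q.2 then t + 1 else t) total) 0

-- ===== PRECONDITION & SPEC =====
-- Pre_ excludes exactly the inputs on which A raises: empty A (IndexError on A[0]) and the
-- inputs A's own asserts reject (ragged rows, an index out of range).
def Pre_getNumsBetween (A : List (List Int)) (i1 : Int) (j1 : Int) (i2 : Int) (j2 : Int) : Prop :=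
  A ≠ [] ∧ (∀ row ∈ A, row.length = A.headI.length) ∧
  0 ≤ i1 ∧ i1 < (A.length : Int) ∧ 0 ≤ j1 ∧ j1 < (A.headI.length : Int) ∧
  0 ≤ i2 ∧ i2 < (A.length : Int) ∧ 0 ≤ j2 ∧ j2 < (A.headI.length : Int)
instance (A : List (List Int)) (i1 : Int) (j1 : Int) (i2 : Int) (j2 : Int) : Decidable (Pre_getNumsBetween A i1 j1 i2 j2) := by unfold Pre_getNumsBetween; infer_instance

def pvWitness_getNumsBetween : List (List Int) × Int × Int × Int × Int := ([[1, 2], [3, 4]], 0, 0, 1, 1)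

def Spec_getNumsBetween (A : List (List Int)) (i1 : Int) (j1 : Int) (i2 : Int) (j2 : Int) (out : Int) : Prop := out = getNumsBetween_alt A i1 j1 i2 j2
instance (A : List (List Int)) (i1 : Int) (j1 : Int) (i2 : Int) (j2 : Int) (out : Int) : Decidable (Spec_getNumsBetween A i1 j1 i2 j2 out) := by unfold Spec_getNumsBetween; infer_instance

-- ===== CLAIM (what is proved, stated in full; the proofs are below) =====
def Claim_equal_getNumsBetween : Prop := ∀ (A : List (List Int)) (i1 : Int) (j1 : Int) (i2 : Int) (j2 : Int), Dom_getNumsBetween A i1 j1 i2 j2 → Pre_getNumsBetween A i1 j1 i2 j2 → Spec_getNumsBetween A i1 j1 i2 j2 (getNumsBetween A i1 j1 i2 j2)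

-- ===== LEMMAS AND PROOFS =====

-- (l.map f).count true = l.countP f
theorem count_true_map {α : Type} (l : List α) (f : α → Bool) :
    (l.map f).count true = l.countP f := by
  induction l with
  | nil => rfl
  | cons x xs ih => simp [List.count_cons, List.countP_cons, ih]

-- cells with index < j1 satisfying p: a prefix count
theorem sum_enum_lt (row : List Int) (s j1 : Int) (p : Int → Bool) :
    ((PySem.List.enumerate row s).map (fun q => if q.1 < j1 ∧ p q.2 then (1:Int) else 0)).sum
      = ((row.take (j1 - s).toNat).countP p : Int) := by
  induction row generalizing s with
  | nil => simp [PySem.List.enumerate_nil]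
  | cons x xs ih =>
    rw [PySem.List.enumerate_cons]
    by_cases h : s < j1
    · have h1 : (j1 - s).toNat = (j1 - (s+1)).toNat + 1 := by omega
      simp only [List.map_cons, List.sum_cons, ih (s+1), h1, List.take_succ_cons,
        List.countP_cons]
      by_cases hp : p x = true <;> simp [hp, h] <;> ring
    · have h1 : (j1 - s).toNat = 0 := by omega
      have h2 : (j1 - (s+1)).toNat = 0 := by omega
      simp only [List.map_cons, List.sum_cons, ih (s+1), h1, h2, List.take_zero]
      simp [List.countP_nil]; omega
-- cells with index > j2 satisfying p: a suffix count
theorem sum_enum_gt (row : List Int) (s j2 : Int) (p : Int → Bool) :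
    ((PySem.List.enumerate row s).map (fun q => if j2 < q.1 ∧ p q.2 then (1:Int) else 0)).sum
      = ((row.drop (j2 + 1 - s).toNat).countP p : Int) := by
  induction row generalizing s with
  | nil => simp [PySem.List.enumerate_nil]
  | cons x xs ih =>
    rw [PySem.List.enumerate_cons]
    by_cases h : j2 < s
    · have h1 : (j2 + 1 - s).toNat = 0 := by omega
      have h2 : (j2 + 1 - (s+1)).toNat = 0 := by omega
      simp only [List.map_cons, List.sum_cons, ih (s+1), h1, h2, List.drop_zero,
        List.countP_cons]
      by_cases hp : p x = true <;> simp [hp, h] <;> ring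
    · have h1 : (j2 + 1 - s).toNat = (j2 + 1 - (s+1)).toNat + 1 := by omega
      simp only [List.map_cons, List.sum_cons, ih (s+1), h1, List.drop_succ_cons]
      simp; omega

-- rows split at index i1 (prefix f, suffix h)
theorem sum_enum_split {α : Type} (A : List α) (s i1 : Int) (f h : α → Int) :
    ((PySem.List.enumerate A s).map (fun p => if p.1 < i1 then f p.2 else h p.2)).sum
      = ((A.take (i1 - s).toNat).map f).sum + ((A.drop (i1 - s).toNat).map h).sum := by
  induction A generalizing s with
  | nil => simp [PySem.List.enumerate_nil]
  | cons x xs ih =>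
    rw [PySem.List.enumerate_cons]
    by_cases hs : s < i1
    · have h1 : (i1 - s).toNat = (i1 - (s+1)).toNat + 1 := by omega
      simp only [List.map_cons, List.sum_cons, ih (s+1), h1, List.take_succ_cons,
        List.drop_succ_cons]
      simp [hs]; ring
    · have h1 : (i1 - s).toNat = 0 := by omega
      have h2 : (i1 - (s+1)).toNat = 0 := by omega
      simp only [List.map_cons, List.sum_cons, ih (s+1), h1, h2, List.take_zero,
        List.drop_zero, List.map_nil, List.sum_nil, List.map_cons]
      simp [hs]

-- sum over enumerate of a function of the element only
theorem sum_enum_snd {α : Type} (l : List α) (s : Int) (F : α → Int) :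
    ((PySem.List.enumerate l s).map (fun q => F q.2)).sum = (l.map F).sum := by
  induction l generalizing s with
  | nil => simp [PySem.List.enumerate_nil]
  | cons x xs ih => rw [PySem.List.enumerate_cons]; simp [ih (s+1)]

-- B's inner loop body written as a plain addition
theorem inner_body_eq (i1 j1 i2 j2 v1 v2 : Int) (p1 : Int) :
    (fun (t : Int) (q : Int × Int) =>
      let t := if (p1 < i1 ∨ q.1 < j1) ∧ q.2 < v1 then t + 1 else t
      if (i2 < p1 ∨ j2 < q.1) ∧ v2 < q.2 then t + 1 else t)
    = fun (t : Int) (q : Int × Int) => t +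
        ((if (p1 < i1 ∨ q.1 < j1) ∧ q.2 < v1 then (1:Int) else 0) +
         (if (i2 < p1 ∨ j2 < q.1) ∧ v2 < q.2 then (1:Int) else 0)) := by
  funext t q; dsimp only; split_ifs <;> ring

-- the whole v1<v2 branch of B as one sum over cells
theorem b_branch_eq (A : List (List Int)) (i1 j1 i2 j2 v1 v2 : Int) :
    (PySem.List.enumerate A 0).foldl (fun total p =>
      (PySem.List.enumerate p.2 0).foldl (fun t q =>
        let t := if (p.1 < i1 ∨ q.1 < j1) ∧ q.2 < v1 then t + 1 else t
        if (i2 < p.1 ∨ j2 < q.1) ∧ v2 < q.2 then t + 1 else t) total) 0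
    = ((PySem.List.enumerate A 0).map (fun p =>
        ((PySem.List.enumerate p.2 0).map (fun q =>
          (if (p.1 < i1 ∨ q.1 < j1) ∧ q.2 < v1 then (1:Int) else 0) +
          (if (i2 < p.1 ∨ j2 < q.1) ∧ v2 < q.2 then (1:Int) else 0))).sum)).sum := by
  have hstep : ∀ (total : Int) (p : Int × List Int),
      (PySem.List.enumerate p.2 0).foldl (fun t q =>
        let t := if (p.1 < i1 ∨ q.1 < j1) ∧ q.2 < v1 then t + 1 else t
        if (i2 < p.1 ∨ j2 < q.1) ∧ v2 < q.2 then t + 1 else t) total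
      = total + ((PySem.List.enumerate p.2 0).map (fun q =>
          (if (p.1 < i1 ∨ q.1 < j1) ∧ q.2 < v1 then (1:Int) else 0) +
          (if (i2 < p.1 ∨ j2 < q.1) ∧ v2 < q.2 then (1:Int) else 0))).sum := by
    intro total p
    rw [inner_body_eq i1 j1 i2 j2 v1 v2 p.1]
    exact PySem.List.foldl_add _ _ _
  calc (PySem.List.enumerate A 0).foldl (fun total p =>
      (PySem.List.enumerate p.2 0).foldl (fun t q =>
        let t := if (p.1 < i1 ∨ q.1 < j1) ∧ q.2 < v1 then t + 1 else t
        if (i2 < p.1 ∨ j2 < q.1) ∧ v2 < q.2 then t + 1 else t) total) 0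
      = (PySem.List.enumerate A 0).foldl (fun total p => total +
          ((PySem.List.enumerate p.2 0).map (fun q =>
            (if (p.1 < i1 ∨ q.1 < j1) ∧ q.2 < v1 then (1:Int) else 0) +
            (if (i2 < p.1 ∨ j2 < q.1) ∧ v2 < q.2 then (1:Int) else 0))).sum) 0 := by
        apply PySem.List.foldl_congr_mem
        exact fun acc x _ => hstep acc x
    _ = _ := by rw [PySem.List.foldl_add]; simp


-- one row's contribution in B, as prefix/suffix counts
theorem inner_sum_eq (i1 j1 i2 j2 v1 v2 : Int) (p : Int × List Int) :
    ((PySem.List.enumerate p.2 0).map (fun q =>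
        (if (p.1 < i1 ∨ q.1 < j1) ∧ q.2 < v1 then (1:Int) else 0) +
        (if (i2 < p.1 ∨ j2 < q.1) ∧ v2 < q.2 then (1:Int) else 0))).sum
    = ((if p.1 < i1 then (p.2.countP (fun v => decide (v < v1)) : Int)
        else ((p.2.take j1.toNat).countP (fun v => decide (v < v1)) : Int))
      + (if i2 < p.1 then (p.2.countP (fun v => decide (v2 < v)) : Int)
        else ((p.2.drop (j2 + 1).toNat).countP (fun v => decide (v2 < v)) : Int))) := by
  rw [PySem.List.sum_map_add_int]
  congr 1
  · by_cases hc : p.1 < i1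
    · simp only [hc, true_or, if_true, true_and]
      rw [sum_enum_snd p.2 0 (fun v => if v < v1 then (1:Int) else 0)]
      simpa using PySem.List.sum_map_ite_one_zero (fun v => decide (v < v1)) p.2
    · simp only [hc, false_or, if_false]
      simpa using sum_enum_lt p.2 0 j1 (fun v => decide (v < v1))
  · by_cases hc : i2 < p.1
    · simp only [hc, true_or, if_true, true_and]
      rw [sum_enum_snd p.2 0 (fun v => if v2 < v then (1:Int) else 0)]
      simpa using PySem.List.sum_map_ite_one_zero (fun v => decide (v2 < v)) p.2
    · simp only [hc, false_or, if_false]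
      simpa using sum_enum_gt p.2 0 j2 (fun v => decide (v2 < v))


-- A's v1<v2 branch as four sums over take/drop
theorem a_branch_eq (A : List (List Int)) (i1 j1 i2 j2 v1 v2 : Int)
    (hi1 : 0 ≤ i1) (hj1 : 0 ≤ j1) (hi2 : 0 ≤ i2) (hj2 : 0 ≤ j2) :
    (PySem.List.slice A none (some (i2+1))).foldl
      (fun acc row => acc + (((PySem.List.slice row (some (j2+1)) none).map (fun num => decide (num > v2))).count true : Int))
      ((PySem.List.slice A (some (i2+1)) none).foldl
        (fun acc row => acc + ((row.map (fun num => decide (num > v2))).count true : Int))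
        ((PySem.List.slice A (some i1) none).foldl
          (fun acc row => acc + (((PySem.List.slice row none (some j1)).map (fun num => decide (num < v1))).count true : Int))
          ((PySem.List.slice A none (some i1)).foldl
            (fun acc row => acc + ((row.map (fun num => decide (num < v1))).count true : Int)) 0)))
    = ((A.take i1.toNat).map (fun row => (row.countP (fun v => decide (v < v1)) : Int))).sum
      + ((A.drop i1.toNat).map (fun row => ((row.take j1.toNat).countP (fun v => decide (v < v1)) : Int))).sum
      + ((A.drop (i2+1).toNat).map (fun row => (row.countP (fun v => decide (v2 < v)) : Int))).sum
      + ((A.take (i2+1).toNat).map (fun row => ((row.drop (j2+1).toNat).countP (fun v => decide (v2 < v)) : Int))).sum := by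
  rw [PySem.List.foldl_add, PySem.List.foldl_add, PySem.List.foldl_add, PySem.List.foldl_add]
  rw [PySem.List.slice_to A hi1, PySem.List.slice_from A hi1,
      PySem.List.slice_from A (by omega : (0:Int) ≤ i2 + 1), PySem.List.slice_to A (by omega : (0:Int) ≤ i2 + 1)]
  simp only [count_true_map]
  have hrow1 : ∀ row : List Int,
      PySem.List.slice row none (some j1) = row.take j1.toNat := fun row => PySem.List.slice_to row hj1
  have hrow2 : ∀ row : List Int,
      PySem.List.slice row (some (j2+1)) none = row.drop (j2+1).toNat := fun row =>
    PySem.List.slice_from row (by omega)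
  simp only [hrow1, hrow2, gt_iff_lt]
  ring

-- B's v1<v2 branch as the same four sums
theorem b_canon (A : List (List Int)) (i1 j1 i2 j2 v1 v2 : Int) :
    (PySem.List.enumerate A 0).foldl (fun total p =>
      (PySem.List.enumerate p.2 0).foldl (fun t q =>
        let t := if (p.1 < i1 ∨ q.1 < j1) ∧ q.2 < v1 then t + 1 else t
        if (i2 < p.1 ∨ j2 < q.1) ∧ v2 < q.2 then t + 1 else t) total) 0
    = ((A.take i1.toNat).map (fun row => (row.countP (fun v => decide (v < v1)) : Int))).sum
      + ((A.drop i1.toNat).map (fun row => ((row.take j1.toNat).countP (fun v => decide (v < v1)) : Int))).sum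
      + ((A.drop (i2+1).toNat).map (fun row => (row.countP (fun v => decide (v2 < v)) : Int))).sum
      + ((A.take (i2+1).toNat).map (fun row => ((row.drop (j2+1).toNat).countP (fun v => decide (v2 < v)) : Int))).sum := by
  rw [b_branch_eq]
  rw [List.map_congr_left (fun p _ => inner_sum_eq i1 j1 i2 j2 v1 v2 p)]
  rw [PySem.List.sum_map_add_int]
  have h2 : ((PySem.List.enumerate A 0).map (fun p =>
        if i2 < p.1 then (p.2.countP (fun v => decide (v2 < v)) : Int)
        else ((p.2.drop (j2+1).toNat).countP (fun v => decide (v2 < v)) : Int))).sum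
      = ((PySem.List.enumerate A 0).map (fun p =>
        if p.1 < i2 + 1 then ((p.2.drop (j2+1).toNat).countP (fun v => decide (v2 < v)) : Int)
        else (p.2.countP (fun v => decide (v2 < v)) : Int))).sum := by
    congr 1
    apply List.map_congr_left
    intro p _
    by_cases h : i2 < p.1
    · rw [if_pos h, if_neg (by omega)]
    · rw [if_neg h, if_pos (by omega)]
  rw [h2, sum_enum_split A 0 i1
        (fun row => (row.countP (fun v => decide (v < v1)) : Int))
        (fun row => ((row.take j1.toNat).countP (fun v => decide (v < v1)) : Int)),
      sum_enum_split A 0 (i2+1)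
        (fun row => ((row.drop (j2+1).toNat).countP (fun v => decide (v2 < v)) : Int))
        (fun row => (row.countP (fun v => decide (v2 < v)) : Int))]
  simp only [sub_zero]
  ring

-- ===== VERDICT (by name: the statement is the Claim_ definition above) =====
theorem getNumsBetween_spec : Claim_equal_getNumsBetween := by
  intro A i1 j1 i2 j2 _ hpre
  obtain ⟨hne, hrows, hi1, hi1', hj1, hj1', hi2, hi2', hj2, hj2'⟩ := hpre
  unfold Spec_getNumsBetween getNumsBetween getNumsBetween_alt
  by_cases h1 : PySem.List.pyGetD (PySem.List.pyGetD A i1 []) j1 0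
      = PySem.List.pyGetD (PySem.List.pyGetD A i2 []) j2 0
  · simp only [h1, if_true]
    rw [PySem.List.foldl_add]
    simp
  · by_cases h2 : PySem.List.pyGetD (PySem.List.pyGetD A i2 []) j2 0
        < PySem.List.pyGetD (PySem.List.pyGetD A i1 []) j1 0
    · simp [h1, h2]
    · simp only [if_neg h1, gt_iff_lt, if_neg h2]
      rw [a_branch_eq A i1 j1 i2 j2 _ _ hi1 hj1 hi2 hj2, b_canon A i1 j1 i2 j2]
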